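-- pv_equiv track=rewrite | github.com/R-a-dio/radio.core | hanyuu/ircbot/irclib/utils.py | parse_modes
-- ===== SOURCE A (Python) =====
-- def parse_modes(string):
--     """
--     Returns a generator that yields tuples of (operator, mode)
--
--     >>> list(parse_modes('+bbb-a'))
--     [('+', 'b'), ('+', 'b'), ('+', 'b'), ('-', 'a')]
--
--     """
--     mode = None
--     for char in string:
--             if char in ('-', '+'):
--                     mode = char
--             elif mode is None:
--                     raise TypeError("Invalid mode string.")
--             else:
--                     yield (mode, char)
-- ===== SOURCE B (Python) =====
-- def parse_modes(string):
--     # Segment scanner: locate each sign, take the run of non-sign chars after it,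
--     # and emit one (sign, char) pair per char of the run.
--     n = len(string)
--     i = 0
--     while i < n:
--         if string[i] in '+-':
--             sign = string[i]
--             j = i + 1
--             while j < n and string[j] not in '+-':
--                 j += 1
--             for char in string[i + 1:j]:
--                 yield (sign, char)
--             i = j
--         else:
--             i += 1
-- ===== Notes on version B (the rewrite author's own statement) =====
-- stated objective: alternative
-- what changed: A tracks the current sign per character with a mutable mode variable; B scans for sign positions and slices out each run of non-sign characters as a segment, emitting (sign, char) pairs per segment.
import Mathlib
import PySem

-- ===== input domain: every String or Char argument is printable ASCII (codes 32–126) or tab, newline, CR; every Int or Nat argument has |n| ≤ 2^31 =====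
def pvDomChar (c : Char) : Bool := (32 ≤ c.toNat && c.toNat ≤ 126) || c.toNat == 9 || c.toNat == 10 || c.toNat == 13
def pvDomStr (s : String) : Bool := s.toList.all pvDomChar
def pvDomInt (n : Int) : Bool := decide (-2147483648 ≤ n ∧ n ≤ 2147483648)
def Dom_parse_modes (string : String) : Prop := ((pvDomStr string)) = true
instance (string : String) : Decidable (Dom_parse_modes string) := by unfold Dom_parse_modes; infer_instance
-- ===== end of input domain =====

-- B replaces A's per-character mode tracking by a segment scanner (find each sign, slice the
-- following run of non-sign chars); equivalent on strings that are empty or start with a sign.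


-- ===== PORT A =====
-- A folds over the characters keeping (current mode, accumulated pairs); the branch where a
-- non-sign char arrives with mode = none is A's `raise TypeError` and is excluded by Pre_.
def pvStepA (st : Option String × List (String × String)) (char : Char) :
    Option String × List (String × String) :=
  if char = '-' ∨ char = '+' then (some (String.mk [char]), st.2)
  else match st.1 with
    | none => st   -- Python: raise TypeError("Invalid mode string.")  (outside Pre_)
    | some mode => (st.1, st.2 ++ [(mode, String.mk [char])])

def parse_modes (string : String) : List (String × String) :=
  (string.toList.foldl pvStepA (none, [])).2

-- ===== PORT B =====
def pvNotSign (c : Char) : Bool := c ≠ '+' ∧ c ≠ '-'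

-- inner while loop of B: each sign, paired with the run of non-sign chars after it
def pvSegmentsB : List Char → List (Char × List Char)
  | [] => []
  | c :: rest =>
    if c = '+' ∨ c = '-' then
      (c, rest.takeWhile pvNotSign) :: pvSegmentsB (rest.dropWhile pvNotSign)
    else pvSegmentsB rest
termination_by l => l.length
decreasing_by
  · exact Nat.lt_succ_of_le (List.length_dropWhile_le _ _)
  · simp

def parse_modes_alt (string : String) : List (String × String) :=
  (pvSegmentsB string.toList).flatMap
    (fun p => p.2.map (fun c => (String.mk [p.1], String.mk [c])))

-- ===== PRECONDITION & SPEC =====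
-- Pre_ excludes exactly the inputs on which A raises TypeError: a nonempty string whose
-- first character is not a sign.
def Pre_parse_modes (string : String) : Prop :=
  string.toList = [] ∨ string.toList.head? = some '+' ∨ string.toList.head? = some '-'
instance (string : String) : Decidable (Pre_parse_modes string) := by
  unfold Pre_parse_modes; infer_instance

def pvWitness_parse_modes : String := "+bbb-a"

def Spec_parse_modes (string : String) (out : List (String × String)) : Prop :=
  out = parse_modes_alt string
instance (string : String) (out : List (String × String)) : Decidable (Spec_parse_modes string out) := by
  unfold Spec_parse_modes; infer_instance

-- ===== CLAIM (what is proved, stated in full; the proofs are below) =====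
def Claim_equal_parse_modes : Prop :=
  ∀ (string : String), Dom_parse_modes string → Pre_parse_modes string →
    Spec_parse_modes string (parse_modes string)

-- ===== LEMMAS AND PROOFS =====

-- loop invariant: from a state with a set mode m, A's fold emits the current (m, ·)-run
-- followed by whatever B produces from the rest of the string.
theorem pvFoldA_some (l : List Char) (m : Char) (acc : List (String × String)) :
    (l.foldl pvStepA (some (String.mk [m]), acc)).2 =
      acc ++ (l.takeWhile pvNotSign).map (fun c => (String.mk [m], String.mk [c]))
          ++ (pvSegmentsB (l.dropWhile pvNotSign)).flatMap
                (fun p => p.2.map (fun c => (String.mk [p.1], String.mk [c]))) := by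
  induction l generalizing m acc with
  | nil => simp [pvSegmentsB]
  | cons c l ih =>
    by_cases h : c = '-' ∨ c = '+'
    · have hns : pvNotSign c = false := by
        rcases h with h | h <;> simp [pvNotSign, h]
      simp only [List.foldl_cons, pvStepA, if_pos h, List.takeWhile_cons, hns,
        List.dropWhile_cons, Bool.false_eq_true, if_false, List.map_nil, List.nil_append]
      rw [ih]
      rw [pvSegmentsB]
      simp only [if_pos (by tauto : c = '+' ∨ c = '-'), List.flatMap_cons]
      simp
    · have hns : pvNotSign c = true := by
        simp only [pvNotSign]
        push_neg at h
        simp [h.1, h.2]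
      simp only [List.foldl_cons, pvStepA, if_neg h, List.takeWhile_cons, hns,
        List.dropWhile_cons, if_true, List.map_cons]
      rw [ih]
      simp

-- ===== VERDICT (by name: the statement is the Claim_ definition above) =====
theorem parse_modes_spec : Claim_equal_parse_modes := by
  intro s _ hpre
  unfold Spec_parse_modes parse_modes parse_modes_alt
  rcases hpre with h | h | h
  · simp [h, pvSegmentsB]
  all_goals {
    rcases hl : s.toList with _ | ⟨c, l⟩
    · simp [pvSegmentsB]
    · rw [hl] at h
      simp only [List.head?_cons, Option.some.injEq] at h
      subst h
      simp only [List.foldl_cons, pvStepA]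
      rw [if_pos (by tauto), pvFoldA_some, pvSegmentsB]
      rw [if_pos (by tauto)]
      simp }
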